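-- pv_equiv track=rewrite | github.com/Kimhyeonsuk/Programmers_Python | python_Algorithm/TwoPointer/CrossStoneBridge.py | solution
-- ===== SOURCE A (Python) =====
-- def chk (stones,mid):
--     cnt=0
--     res=0
--     for stone in stones:
--         if stone<mid:
--             res=max(res,cnt)
--             cnt=0
--         else:
--             cnt+=1
--
--     if mid>res:
--         return False
--     else:
--         return True
--
-- def solution(stones, k):
--     answer = 0
--     low=0
--     high=max(stones)
--     while low<=high :
--         mid=(low+high)//2
--         if chk(stones,mid):
--             low=mid+1
--         else:
--             high=mid-1
--
--     return low
-- ===== SOURCE B (Python) =====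
-- def _ok(stones, mid):
--     # mid-length run check, staged: collect drop indices, then scan gaps between them
--     if mid <= 0:
--         return True
--     drops = [i for i, s in enumerate(stones) if s < mid]
--     if not drops:
--         return False
--     prev = -1
--     best = 0
--     for d in drops:
--         if best < d - prev - 1:
--             best = d - prev - 1
--         prev = d
--     return mid <= best
--
-- def solution(stones, k):
--     low, high = 0, max(stones)
--     while low <= high:
--         mid = (low + high) // 2
--         if _ok(stones, mid):
--             low = mid + 1
--         else:
--             high = mid - 1
--     return low
-- ===== Notes on version B (the rewrite author's own statement) =====
-- stated objective: alternative
-- what changed: A's chk is not monotone in mid (the trailing run is never counted), so the binary-search decision path itself is the semantics and is kept; B replaces A's one-pass counter+running-max check by a staged computation: first build the list of drop indices (stones[i] < mid), then scan that index list for a gap of length >= mid, with mid <= 0 answered up front.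
-- outside the precondition, e.g. on solution([], 5): A raises ValueError, B raises ValueError
import Mathlib
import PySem

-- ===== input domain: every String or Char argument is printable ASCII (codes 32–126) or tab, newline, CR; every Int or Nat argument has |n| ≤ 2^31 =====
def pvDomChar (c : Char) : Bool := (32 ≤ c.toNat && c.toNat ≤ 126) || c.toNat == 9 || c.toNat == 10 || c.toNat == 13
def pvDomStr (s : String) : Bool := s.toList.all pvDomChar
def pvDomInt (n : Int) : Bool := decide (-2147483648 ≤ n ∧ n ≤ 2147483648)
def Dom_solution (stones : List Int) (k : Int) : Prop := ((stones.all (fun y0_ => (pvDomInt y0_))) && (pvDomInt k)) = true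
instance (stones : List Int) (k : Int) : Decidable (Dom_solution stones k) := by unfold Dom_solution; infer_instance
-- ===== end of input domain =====

-- B keeps A's binary-search decision path (A's chk is not monotone in mid, so that path IS the
-- semantics) but replaces the one-pass counter+running-max check by a staged computation:
-- collect the drop indices, then scan the gaps between consecutive drops (objective: alternative).

-- ===== PORT A =====
-- the for-loop of chk: state (cnt, res), branches in A's order
def chkFold (mid : Int) : List Int → Int × Int → Int × Int
  | [], st => st
  | stone :: rest, (cnt, res) =>
      if stone < mid then chkFold mid rest (0, max res cnt)
      else chkFold mid rest (cnt + 1, res)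

def chk (stones : List Int) (mid : Int) : Bool :=
  if mid > (chkFold mid stones (0, 0)).2 then false else true

-- the while low<=high loop of A
def solLoop (stones : List Int) (low high : Int) : Int :=
  if low ≤ high then
    let mid := PySem.Int.floordiv (low + high) 2
    if chk stones mid then solLoop stones (mid + 1) high
    else solLoop stones low (mid - 1)
  else low
termination_by (high + 1 - low).toNat
decreasing_by
  · have h := PySem.Int.floordiv_two_mid_bounds (by assumption : low ≤ high)
    omega
  · have h := PySem.Int.floordiv_two_mid_bounds (by assumption : low ≤ high)
    omega

def solution (stones : List Int) (k : Int) : Int :=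
  solLoop stones 0 ((PySem.List.max? stones (fun x => x)).getD 0)

-- ===== PORT B =====
-- drops = [i for i, s in enumerate(stones) if s < mid]
def dropIdx (stones : List Int) (mid : Int) : List Int :=
  ((PySem.List.enumerate stones 0).filter (fun p => p.2 < mid)).map (fun p => p.1)

-- the for-loop over drops: prev starts at -1, best at 0
def bestGap : List Int → Int → Int → Int
  | [], _, best => best
  | d :: ds, prev, best => bestGap ds d (if best < d - prev - 1 then d - prev - 1 else best)

def okB (stones : List Int) (mid : Int) : Bool :=
  if mid ≤ 0 then true
  else
    match dropIdx stones mid with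
    | [] => false
    | d :: ds => decide (mid ≤ bestGap (d :: ds) (-1) 0)

-- the while loop of B, transliterated with sufficient fuel (the proof shows the fuel suffices)
def bsearch (stones : List Int) : Nat → Int → Int → Int
  | 0, lo, _ => lo
  | n + 1, lo, hi =>
      if hi < lo then lo
      else
        let m := PySem.Int.floordiv (lo + hi) 2
        if okB stones m then bsearch stones n (m + 1) hi
        else bsearch stones n lo (m - 1)

def solution_alt (stones : List Int) (k : Int) : Int :=
  let hi := (PySem.List.max? stones (fun x => x)).getD 0
  bsearch stones (hi + 2).toNat 0 hi

-- ===== PRECONDITION & SPEC =====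
-- Pre_ excludes only the empty list, where Python's max([]) raises ValueError (in A and in B alike).
def Pre_solution (stones : List Int) (k : Int) : Prop := stones ≠ []
instance (stones : List Int) (k : Int) : Decidable (Pre_solution stones k) := by unfold Pre_solution; infer_instance
def pvWitness_solution : List Int × Int := ([2, 2, 1], 1)

def Spec_solution (stones : List Int) (k : Int) (out : Int) : Prop := out = solution_alt stones k
instance (stones : List Int) (k : Int) (out : Int) : Decidable (Spec_solution stones k out) := by unfold Spec_solution; infer_instance

-- ===== CLAIM (what is proved, stated in full; the proofs are below) =====
def Claim_equal_solution : Prop := ∀ (stones : List Int) (k : Int), Dom_solution stones k → Pre_solution stones k → Spec_solution stones k (solution stones k)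

-- ===== LEMMAS AND PROOFS =====

-- bestGap never decreases below its accumulator
lemma bestGap_ge (ds : List Int) (prev best : Int) : best ≤ bestGap ds prev best := by
  induction ds generalizing prev best with
  | nil => simp [bestGap]
  | cons d ds ih =>
    simp only [bestGap]
    refine le_trans ?_ (ih d _)
    split <;> omega

-- A's counter+max fold equals B's gap scan over the drop-index list
lemma chkFold_eq_bestGap (mid : Int) (l : List Int) (i prev res : Int) :
    (chkFold mid l (i - prev - 1, res)).2
      = bestGap (((PySem.List.enumerate l i).filter (fun p => p.2 < mid)).map (fun p => p.1))
          prev res := by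
  induction l generalizing i prev res with
  | nil => simp [chkFold, PySem.List.enumerate_nil, bestGap]
  | cons s rest ih =>
    rw [PySem.List.enumerate_cons]
    by_cases hs : s < mid
    · have hA : chkFold mid (s :: rest) (i - prev - 1, res)
          = chkFold mid rest (0, max res (i - prev - 1)) := by
        simp [chkFold, hs]
      rw [hA]
      have h0 : (0 : Int) = (i + 1) - i - 1 := by omega
      rw [h0, ih (i + 1) i (max res (i - prev - 1))]
      simp only [List.filter_cons, List.map_cons, hs, decide_true, if_true, bestGap]
      congr 1
      rw [max_def]
      split <;> split <;> omega
    · have hA : chkFold mid (s :: rest) (i - prev - 1, res)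
          = chkFold mid rest (i - prev - 1 + 1, res) := by
        simp [chkFold, hs]
      rw [hA]
      have h1 : i - prev - 1 + 1 = (i + 1) - prev - 1 := by omega
      rw [h1, ih (i + 1) prev res]
      simp [hs]

lemma chk_eq_okB (stones : List Int) (mid : Int) : chk stones mid = okB stones mid := by
  have key : (chkFold mid stones (0, 0)).2 = bestGap (dropIdx stones mid) (-1) 0 := by
    have h0 : (0 : Int) = 0 - (-1) - 1 := by omega
    calc (chkFold mid stones (0, 0)).2
        = (chkFold mid stones (0 - (-1) - 1, 0)).2 := by rw [← h0]
      _ = _ := by rw [chkFold_eq_bestGap mid stones 0 (-1) 0]; rfl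
  simp only [chk, okB, key]
  by_cases hm : mid ≤ 0
  · have hge : (0 : Int) ≤ bestGap (dropIdx stones mid) (-1) 0 := bestGap_ge _ _ _
    simp [hm, show ¬ mid > bestGap (dropIdx stones mid) (-1) 0 by omega]
  · rw [if_neg hm]
    cases hd : dropIdx stones mid with
    | nil => simp [bestGap, show mid > 0 by omega]
    | cons d ds =>
      by_cases hle : mid ≤ bestGap (d :: ds) (-1) 0
      · simp [hle, show ¬ mid > bestGap (d :: ds) (-1) 0 by omega]
      · simp [hle, show mid > bestGap (d :: ds) (-1) 0 by omega]

lemma solLoop_step (stones : List Int) (low high : Int) (h : low ≤ high) :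
    solLoop stones low high =
      if chk stones (PySem.Int.floordiv (low + high) 2) = true then
        solLoop stones (PySem.Int.floordiv (low + high) 2 + 1) high
      else solLoop stones low (PySem.Int.floordiv (low + high) 2 - 1) := by
  rw [solLoop, if_pos h]

-- with enough fuel, B's loop runs exactly A's loop
lemma bsearch_eq_solLoop (stones : List Int) (n : Nat) (lo hi : Int)
    (hfuel : (hi + 1 - lo).toNat ≤ n) :
    bsearch stones n lo hi = solLoop stones lo hi := by
  induction n generalizing lo hi with
  | zero =>
    have : hi < lo := by omega
    rw [bsearch, solLoop, if_neg (by omega)]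
  | succ n ih =>
    by_cases hlt : hi < lo
    · rw [bsearch, if_pos hlt, solLoop, if_neg (by omega)]
    · have hle : lo ≤ hi := by omega
      have hmid := PySem.Int.floordiv_two_mid_bounds hle
      rw [bsearch, if_neg hlt, solLoop_step stones lo hi hle]
      simp only [← chk_eq_okB]
      split
      · exact ih _ _ (by omega)
      · exact ih _ _ (by omega)

-- ===== VERDICT (by name: the statement is the Claim_ definition above) =====
theorem solution_spec : Claim_equal_solution := by
  intro stones k _ _
  unfold Spec_solution solution solution_alt
  exact (bsearch_eq_solLoop stones _ 0 _ (by omega)).symm
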